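-- pv_equiv track=rewrite | github.com/CODING-TEST-ANYMORE/Coding-Test-Study | 03-Heap/chaerin/test4.py | solution
-- ===== SOURCE A (Python) =====
-- def solution(t, d):
--     d.sort()
--     cnt = 0
--     n = len(d)
--     for i in range(n - 2):
--         left_ind, right_ind = i + 1, n - 1
--         while left_ind < right_ind:
--             sum = d[i] + d[left_ind] + d[right_ind]
--             if sum > t:
--                 right_ind -= 1
--             else:
--                 cnt += right_ind - left_ind
--                 left_ind += 1
--     return cnt
-- ===== SOURCE B (Python) =====
-- def solution(t, d):
--     d.sort()
--     n = len(d)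
--     cnt = 0
--     for i in range(n):
--         for j in range(i + 1, n):
--             x = t - d[i] - d[j]
--             lo, hi = 0, n
--             while lo < hi:
--                 mid = (lo + hi) // 2
--                 if d[mid] <= x:
--                     lo = mid + 1
--                 else:
--                     hi = mid
--             cnt += max(lo - (j + 1), 0)
--     return cnt
-- ===== Notes on version B (the rewrite author's own statement) =====
-- stated objective: alternative
-- what changed: Replaces the two-pointer sweep (shrink-right / advance-left with batched 'right-left' additions) by a pair loop that counts valid third elements with a hand-written binary search over the sorted array; trades the O(n^2) sweep for an O(n^2 log n) search-based count.
import Mathlib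
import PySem

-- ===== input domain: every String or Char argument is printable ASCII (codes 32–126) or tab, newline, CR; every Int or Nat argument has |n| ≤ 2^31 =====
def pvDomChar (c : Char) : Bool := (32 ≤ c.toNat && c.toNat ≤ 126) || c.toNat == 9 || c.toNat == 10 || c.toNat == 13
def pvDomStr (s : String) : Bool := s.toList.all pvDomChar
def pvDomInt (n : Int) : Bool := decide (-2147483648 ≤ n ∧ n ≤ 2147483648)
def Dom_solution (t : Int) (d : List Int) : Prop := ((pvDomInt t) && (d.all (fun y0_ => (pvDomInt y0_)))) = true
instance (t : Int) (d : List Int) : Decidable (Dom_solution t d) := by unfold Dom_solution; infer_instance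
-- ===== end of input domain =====

-- B replaces A's two-pointer sweep by a pair loop with a binary search for the count of valid
-- third elements; both Pythons sort d in place (same observable side effect); the equivalence
-- proved is about the return value.

-- ===== PORT A =====
-- the 'while left_ind < right_ind' loop of A for a fixed i (right - left shrinks each step)
def tpLoop (t : Int) (s : List Int) (i l r : Nat) (cnt : Int) : Int :=
  if l < r then
    if s.getD i 0 + s.getD l 0 + s.getD r 0 > t then
      tpLoop t s i l (r - 1) cnt
    else
      tpLoop t s i (l + 1) r (cnt + ((r - l : Nat) : Int))
  else cnt
termination_by r - l
decreasing_by all_goals omega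

def solution (t : Int) (d : List Int) : Int :=
  let s := PySem.List.sorted d (fun x => x) false
  let n := s.length
  (List.range (n - 2)).foldl (fun cnt i => tpLoop t s i (i + 1) (n - 1) cnt) 0

-- ===== PORT B =====
-- B's hand-written 'while lo < hi' binary search: first index lo with s[lo] > x
def bsLoop (x : Int) (s : List Int) (lo hi : Nat) : Nat :=
  if lo < hi then
    let mid := (lo + hi) / 2
    if s.getD mid 0 ≤ x then bsLoop x s (mid + 1) hi
    else bsLoop x s lo mid
  else lo
termination_by hi - lo
decreasing_by all_goals omega

def solution_alt (t : Int) (d : List Int) : Int :=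
  let s := PySem.List.sorted d (fun x => x) false
  let n := s.length
  (List.range n).foldl (fun cnt i =>
    (List.range' (i + 1) (n - (i + 1))).foldl (fun cnt j =>
      let x := t - s.getD i 0 - s.getD j 0
      let lo := bsLoop x s 0 n
      cnt + max ((lo : Int) - ((j : Int) + 1)) 0) cnt) 0

-- ===== PRECONDITION & SPEC =====
def Spec_solution (t : Int) (d : List Int) (out : Int) : Prop := out = solution_alt t d
instance (t : Int) (d : List Int) (out : Int) : Decidable (Spec_solution t d out) := by unfold Spec_solution; infer_instance

-- ===== CLAIM (what is proved, stated in full; the proofs are below) =====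
def Claim_equal_solution : Prop := ∀ (t : Int) (d : List Int), Dom_solution t d → Spec_solution t d (solution t d)

-- ===== LEMMAS AND PROOFS =====

-- pairK t s i l r = number of pairs (j,k) with l ≤ j < k ≤ r and s[i]+s[j]+s[k] ≤ t;
-- it is invariant under each two-pointer step and equals B's per-i binary-search total.
def pairK (t : Int) (s : List Int) (i l r : Nat) : Nat :=
  ∑ j ∈ Finset.Ico l (r + 1),
    ((Finset.Ico (j + 1) (r + 1)).filter (fun k => s.getD i 0 + s.getD j 0 + s.getD k 0 ≤ t)).card

theorem pairK_step_r (t : Int) (s : List Int) (i l r : Nat)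
    (hmono : ∀ p q, p ≤ q → q < s.length → s.getD p 0 ≤ s.getD q 0)
    (hlr : l < r) (hr : r < s.length)
    (hgt : s.getD i 0 + s.getD l 0 + s.getD r 0 > t) :
    pairK t s i l r = pairK t s i l (r - 1) := by
  obtain ⟨rr, rfl⟩ : ∃ rr, r = rr + 1 := ⟨r - 1, by omega⟩
  unfold pairK
  rw [show rr + 1 - 1 = rr from rfl]
  rw [Finset.sum_Ico_succ_top (by omega : l ≤ rr + 1)]
  rw [Finset.Ico_eq_empty (by omega : ¬ rr + 1 + 1 < rr + 1 + 1), Finset.filter_empty,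
    Finset.card_empty, add_zero]
  refine Finset.sum_congr rfl fun j hj => ?_
  rw [Finset.mem_Ico] at hj
  rw [Nat.Ico_succ_right_eq_insert_Ico (by omega : j + 1 ≤ rr + 1), Finset.filter_insert,
    if_neg (by
      have h1 : s.getD l 0 ≤ s.getD j 0 := hmono l j hj.1 (by omega)
      omega)]

theorem pairK_step_l (t : Int) (s : List Int) (i l r : Nat)
    (hmono : ∀ p q, p ≤ q → q < s.length → s.getD p 0 ≤ s.getD q 0)
    (hlr : l < r) (hr : r < s.length)
    (hle : s.getD i 0 + s.getD l 0 + s.getD r 0 ≤ t) :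
    pairK t s i l r = (r - l) + pairK t s i (l + 1) r := by
  unfold pairK
  rw [Finset.sum_eq_sum_Ico_succ_bot (by omega : l < r + 1)]
  congr 1
  rw [Finset.filter_true_of_mem (fun k hk => by
    rw [Finset.mem_Ico] at hk
    have h1 : s.getD k 0 ≤ s.getD r 0 := hmono k r (by omega) hr
    omega)]
  rw [Nat.card_Ico]
  omega

theorem pairK_zero (t : Int) (s : List Int) (i l r : Nat) (h : ¬ l < r) :
    pairK t s i l r = 0 := by
  unfold pairK
  refine Finset.sum_eq_zero fun j hj => ?_
  rw [Finset.mem_Ico] at hj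
  rw [Finset.Ico_eq_empty (by omega), Finset.filter_empty, Finset.card_empty]

theorem tpLoop_eq (t : Int) (s : List Int) (i : Nat)
    (hmono : ∀ p q, p ≤ q → q < s.length → s.getD p 0 ≤ s.getD q 0) :
    ∀ (m l r : Nat) (cnt : Int), r - l ≤ m → r < s.length →
      tpLoop t s i l r cnt = cnt + (pairK t s i l r : Int) := by
  intro m
  induction m with
  | zero =>
    intro l r cnt hm hr
    rw [tpLoop, if_neg (by omega), pairK_zero t s i l r (by omega)]
    simp
  | succ m ih =>
    intro l r cnt hm hr
    by_cases hlr : l < r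
    · rw [tpLoop, if_pos hlr]
      by_cases hgt : s.getD i 0 + s.getD l 0 + s.getD r 0 > t
      · rw [if_pos hgt, ih l (r - 1) cnt (by omega) (by omega),
          pairK_step_r t s i l r hmono hlr hr hgt]
      · rw [if_neg hgt, ih (l + 1) r _ (by omega) hr,
          pairK_step_l t s i l r hmono hlr hr (by omega)]
        push_cast
        ring
    · rw [tpLoop, if_neg hlr, pairK_zero t s i l r hlr]
      simp

theorem bsLoop_spec (x : Int) (s : List Int)
    (hmono : ∀ p q, p ≤ q → q < s.length → s.getD p 0 ≤ s.getD q 0) :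
    ∀ (m lo hi : Nat), hi - lo ≤ m → lo ≤ hi → hi ≤ s.length →
      (∀ k, k < lo → s.getD k 0 ≤ x) →
      (∀ k, hi ≤ k → k < s.length → x < s.getD k 0) →
      lo ≤ bsLoop x s lo hi ∧ bsLoop x s lo hi ≤ hi ∧
        (∀ k, k < bsLoop x s lo hi → s.getD k 0 ≤ x) ∧
        (∀ k, bsLoop x s lo hi ≤ k → k < s.length → x < s.getD k 0) := by
  intro m
  induction m with
  | zero =>
    intro lo hi hm hle hhi h1 h2
    rw [bsLoop, if_neg (by omega)]
    exact ⟨le_rfl, hle, h1, fun k hk hk' => h2 k (by omega) hk'⟩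
  | succ m ih =>
    intro lo hi hm hle hhi h1 h2
    by_cases hlh : lo < hi
    · rw [bsLoop, if_pos hlh]
      simp only
      by_cases hc : s.getD ((lo + hi) / 2) 0 ≤ x
      · rw [if_pos hc]
        have h := ih ((lo + hi) / 2 + 1) hi (by omega) (by omega) hhi
          (fun k hk => le_trans (hmono k ((lo + hi) / 2) (by omega) (by omega)) hc) h2
        exact ⟨by omega, h.2.1, h.2.2.1, h.2.2.2⟩
      · rw [if_neg hc]
        have h := ih lo ((lo + hi) / 2) (by omega) (by omega) (by omega) h1
          (fun k hk hk' => lt_of_lt_of_le (by omega) (hmono ((lo + hi) / 2) k hk hk'))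
        exact ⟨h.1, by omega, h.2.2.1, h.2.2.2⟩
    · rw [bsLoop, if_neg hlh]
      exact ⟨le_rfl, hle, h1, fun k hk hk' => h2 k (by omega) hk'⟩

theorem bs_count (t : Int) (s : List Int) (i j : Nat)
    (hmono : ∀ p q, p ≤ q → q < s.length → s.getD p 0 ≤ s.getD q 0) :
    ((((Finset.Ico (j + 1) s.length).filter
        (fun k => s.getD i 0 + s.getD j 0 + s.getD k 0 ≤ t)).card : Nat) : Int)
      = max ((bsLoop (t - s.getD i 0 - s.getD j 0) s 0 s.length : Int) - ((j : Int) + 1)) 0 := by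
  obtain ⟨hl, hr, h1, h2⟩ := bsLoop_spec (t - s.getD i 0 - s.getD j 0) s hmono s.length 0 s.length
    (by omega) (by omega) le_rfl (fun k hk => absurd hk (Nat.not_lt_zero k))
    (fun k hk hk' => absurd (lt_of_le_of_lt hk hk') (lt_irrefl _))
  set r := bsLoop (t - s.getD i 0 - s.getD j 0) s 0 s.length with hrdef
  have : (Finset.Ico (j + 1) s.length).filter
      (fun k => s.getD i 0 + s.getD j 0 + s.getD k 0 ≤ t) = Finset.Ico (j + 1) r := by
    ext k
    simp only [Finset.mem_filter, Finset.mem_Ico]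
    constructor
    · rintro ⟨⟨hk1, hk2⟩, hc⟩
      refine ⟨hk1, ?_⟩
      by_contra hge
      exact absurd hc (by have := h2 k (by omega) hk2; omega)
    · rintro ⟨hk1, hk2⟩
      have hkl : k < s.length := lt_of_lt_of_le hk2 hr
      have := h1 k hk2
      exact ⟨⟨hk1, hkl⟩, by omega⟩
  rw [this, Nat.card_Ico]
  omega

theorem sum_map_range (g : Nat → Int) (m : Nat) :
    ((List.range m).map g).sum = ∑ i ∈ Finset.range m, g i := by
  simp [Finset.sum, Finset.range, Multiset.range]

theorem sum_map_range' (g : Nat → Int) (a b : Nat) :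
    ((List.range' a b).map g).sum = ∑ j ∈ Finset.Ico a (a + b), g j := by
  rw [Nat.Ico_eq_range', Nat.add_sub_cancel_left]
  simp [Finset.sum]

-- trip t s i n = number of pairs (j,k) with i < j < k < n and s[i]+s[j]+s[k] ≤ t
def trip (t : Int) (s : List Int) (i n : Nat) : Nat :=
  ∑ j ∈ Finset.Ico (i + 1) n,
    ((Finset.Ico (j + 1) n).filter (fun k => s.getD i 0 + s.getD j 0 + s.getD k 0 ≤ t)).card

theorem foldl_body_add {α : Type} (f : Int → α → Int) (g : α → Int) :
    ∀ (l : List α) (c : Int), (∀ (c : Int) (x : α), x ∈ l → f c x = c + g x) →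
      l.foldl f c = c + (l.map g).sum := by
  intro l
  induction l with
  | nil => intro c _; simp
  | cons x xs ih =>
    intro c h
    rw [List.foldl_cons, ih _ (fun c y hy => h c y (List.mem_cons_of_mem x hy)),
      h c x List.mem_cons_self, List.map_cons, List.sum_cons]
    ring

theorem trip_top_zero (t : Int) (s : List Int) (i n : Nat) (h : n ≤ i + 2) :
    trip t s i n = 0 := by
  unfold trip
  refine Finset.sum_eq_zero fun j hj => ?_
  rw [Finset.mem_Ico] at hj
  rw [Finset.Ico_eq_empty (by omega), Finset.filter_empty, Finset.card_empty]

theorem pairK_eq_trip (t : Int) (s : List Int) (i n : Nat) (h : 1 ≤ n) :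
    pairK t s i (i + 1) (n - 1) = trip t s i n := by
  unfold pairK trip
  rw [Nat.sub_add_cancel h]

theorem sortedD_mono (d : List Int) : ∀ (p q : Nat), p ≤ q →
    q < (PySem.List.sorted d (fun x => x) false).length →
    (PySem.List.sorted d (fun x => x) false).getD p 0 ≤ (PySem.List.sorted d (fun x => x) false).getD q 0 := by
  intro p q hpq hq
  rw [List.getD_eq_getElem _ _ (lt_of_le_of_lt hpq hq), List.getD_eq_getElem _ _ hq]
  exact PySem.List.sorted_id_getElem_mono d hpq hq

theorem solution_spec' (t : Int) (d : List Int) : solution t d = solution_alt t d := by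
  unfold solution solution_alt
  set s := PySem.List.sorted d (fun x => x) false with hs
  set n := s.length with hn
  have hmono := sortedD_mono d
  rw [← hs, ← hn] at hmono
  -- A side: each tpLoop call contributes pairK, then sum over i
  rw [foldl_body_add _ (fun i => (pairK t s i (i + 1) (n - 1) : Int)) _ _
    (fun c i hi => by
      have hi' : i < n - 2 := List.mem_range.mp hi
      exact tpLoop_eq t s i hmono n (i + 1) (n - 1) c (by omega) (by omega)),
    sum_map_range _ (n - 2)]
  -- B side: each binary search contributes its slot count, then sums over j and i
  rw [foldl_body_add _ (fun i => (trip t s i n : Int)) _ _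
    (fun c i hi => by
      have hi' : i < n := List.mem_range.mp hi
      rw [foldl_body_add _ (fun j =>
          max ((bsLoop (t - s.getD i 0 - s.getD j 0) s 0 n : Int) - ((j : Int) + 1)) 0) _ _
        (fun c j _ => rfl),
        sum_map_range' _ (i + 1) (n - (i + 1)),
        show i + 1 + (n - (i + 1)) = n by omega]
      congr 1
      unfold trip
      push_cast
      exact Finset.sum_congr rfl fun j hj => (bs_count t s i j hmono).symm),
    sum_map_range _ n]
  simp only [zero_add]
  -- finally: ∑ i < n-2 of pairK = ∑ i < n of trip (the two extra i contribute nothing)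
  have hcong : ∑ i ∈ Finset.range (n - 2), ((pairK t s i (i + 1) (n - 1) : Nat) : Int)
      = ∑ i ∈ Finset.range (n - 2), ((trip t s i n : Nat) : Int) :=
    Finset.sum_congr rfl fun i hi => by
      rw [pairK_eq_trip t s i n (by have := Finset.mem_range.mp hi; omega)]
  rw [hcong]
  clear_value n
  clear hn hmono hcong
  rcases n with _ | _ | m
  · rfl
  · rw [Finset.sum_range_succ]
    simp [trip_top_zero t s 0 1 (by omega)]
  · rw [show m + 2 - 2 = m from rfl, Finset.sum_range_succ, Finset.sum_range_succ,
      trip_top_zero t s (m + 1) (m + 2) (by omega), trip_top_zero t s m (m + 2) (by omega)]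
    simp

-- ===== VERDICT (by name: the statement is the Claim_ definition above) =====
theorem solution_spec : Claim_equal_solution := by
  intro t d _
  unfold Spec_solution
  exact solution_spec' t d
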